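-- pv_equiv track=rewrite | github.com/Guillen00/Python_Exercises | Python/8.agrupar.py | bases
-- ===== SOURCE A (Python) =====
-- def bases(x,t):
--     x=str(x)
--     z=x[t]
--     res=""
--     if(t==len(x)-1):
--         res=res+z
--         return res
--
--     else:
--         res=res+z+'_'
--         return res+bases(x,t+1)
-- ===== SOURCE B (Python) =====
-- def bases(x, t):
--     x = str(x)
--     i = t
--     z = x[i]
--     res = ""
--     while i != len(x) - 1:
--         res += z + '_'
--         i += 1
--         z = x[i]
--     return res + z
-- ===== Notes on version B (the rewrite author's own statement) =====
-- stated objective: alternative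
-- what changed: Replaces A's string-rebuilding recursion with a single iterative while loop that accumulates the result with an explicit accumulator, indexing each character exactly once.
import Mathlib
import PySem

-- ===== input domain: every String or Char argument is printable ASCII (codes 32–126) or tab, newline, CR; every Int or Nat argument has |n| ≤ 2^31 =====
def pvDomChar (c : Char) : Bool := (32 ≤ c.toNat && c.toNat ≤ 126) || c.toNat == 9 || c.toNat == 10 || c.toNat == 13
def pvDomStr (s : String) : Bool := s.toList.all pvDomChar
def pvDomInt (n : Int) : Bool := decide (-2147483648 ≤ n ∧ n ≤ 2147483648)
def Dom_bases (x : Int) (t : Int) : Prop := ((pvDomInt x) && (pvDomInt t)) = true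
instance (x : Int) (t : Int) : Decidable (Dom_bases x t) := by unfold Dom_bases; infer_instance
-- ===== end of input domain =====

-- One line: B replaces A's recursion with an iterative accumulator loop; same values on all indices where A does not raise.

-- ===== PORT A =====
-- A recurses on bases(x, t+1) where x is already a string (str of a string is itself),
-- so the recursion is over the same character list with t incremented; fuel bounds the
-- recursion depth (2*len+1 suffices for every in-range t, see the lemmas below).
def basesRecA (s : List Char) : Int → Nat → String
  | _, 0 => ""          -- fuel exhausted: unreachable under Pre_bases
  | t, fuel+1 =>
    match PySem.List.pyGet? s t with
    | none => ""        -- z = x[t] raises IndexError: outside Pre_bases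
    | some z =>
      let res := ""
      if t = (s.length : Int) - 1 then res ++ String.ofList [z]
      else (res ++ String.ofList [z] ++ "_") ++ basesRecA s (t+1) fuel

def bases (x : Int) (t : Int) : String :=
  let s := PySem.Int.toChars x
  basesRecA s t (2 * s.length + 1)

-- ===== PORT B =====
-- the while loop of Source B: state (i, z, res); fuel bounds the iteration count
def basesLoopB (s : List Char) : Nat → Int → Char → String → String
  | 0, _, z, res => res ++ String.ofList [z]   -- fuel exhausted: unreachable under Pre_bases
  | fuel+1, i, z, res =>
    if i = (s.length : Int) - 1 then res ++ String.ofList [z]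
    else
      match PySem.List.pyGet? s (i+1) with
      | none => ""     -- z = x[i] raises IndexError: outside Pre_bases
      | some z' => basesLoopB s fuel (i+1) z' (res ++ String.ofList [z] ++ "_")

def bases_alt (x : Int) (t : Int) : String :=
  let s := PySem.Int.toChars x
  match PySem.List.pyGet? s t with
  | none => ""         -- z = x[t] raises IndexError: outside Pre_bases
  | some z => basesLoopB s (2 * s.length) t z ""

-- ===== PRECONDITION & SPEC =====
-- A raises IndexError exactly when t is out of Python's (negative-friendly) index range of str(x).
def Pre_bases (x : Int) (t : Int) : Prop :=
  PySem.Raise.InRange (PySem.Int.toChars x).length t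
instance (x : Int) (t : Int) : Decidable (Pre_bases x t) := by unfold Pre_bases; infer_instance

def pvWitness_bases : Int × Int := (1234, 1)

def Spec_bases (x : Int) (t : Int) (out : String) : Prop := out = bases_alt x t
instance (x : Int) (t : Int) (out : String) : Decidable (Spec_bases x t out) := by unfold Spec_bases; infer_instance

-- ===== CLAIM (what is proved, stated in full; the proofs are below) =====
def Claim_equal_bases : Prop := ∀ (x : Int) (t : Int), Dom_bases x t → Pre_bases x t → Spec_bases x t (bases x t)

-- ===== LEMMAS AND PROOFS =====

lemma inRange_of_pyGet?_some {s : List Char} {i : Int} {z : Char}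
    (h : PySem.List.pyGet? s i = some z) : -(s.length : Int) ≤ i ∧ i < s.length := by
  by_contra hc
  have : PySem.List.pyGet? s i = none := by
    rw [PySem.List.pyGet?_eq_none_iff]
    intro hr
    exact hc (by simpa [PySem.Raise.InRange] using hr)
  simp [this] at h

lemma loopB_eq_recA (s : List Char) : ∀ (fuel : Nat) (i : Int) (z : Char) (res : String),
    PySem.List.pyGet? s i = some z → ((s.length : Int) - 1 - i).toNat ≤ fuel →
    basesLoopB s fuel i z res = res ++ basesRecA s i (fuel + 1) := by
  intro fuel
  induction fuel with
  | zero =>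
    intro i z res hz hf
    obtain ⟨h1, h2⟩ := inRange_of_pyGet?_some hz
    have hi : i = (s.length : Int) - 1 := by omega
    rw [hi] at hz
    simp [basesLoopB, basesRecA, hz, hi]
  | succ fuel ih =>
    intro i z res hz hf
    obtain ⟨h1, h2⟩ := inRange_of_pyGet?_some hz
    by_cases hi : i = (s.length : Int) - 1
    · rw [hi] at hz
      simp [basesLoopB, basesRecA, hz, hi]
    · have hlt : i < (s.length : Int) - 1 := by omega
      have hr' : PySem.Raise.InRange s.length (i+1) := by
        simp [PySem.Raise.InRange]; omega
      have hne : PySem.List.pyGet? s (i+1) ≠ none := by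
        intro hnone
        rw [PySem.List.pyGet?_eq_none_iff] at hnone
        exact hnone hr'
      obtain ⟨z', hz'⟩ := Option.ne_none_iff_exists'.mp hne
      have hrec := ih (i+1) z' (res ++ String.ofList [z] ++ "_") hz' (by omega)
      simp only [basesLoopB, if_neg hi, hz']
      rw [hrec]
      conv_rhs => rw [show fuel + 1 + 1 = (fuel + 1) + 1 from rfl]
      simp only [basesRecA, hz, if_neg hi]
      simp [String.append_assoc]

theorem bases_spec_impl : ∀ (x : Int) (t : Int), Pre_bases x t → bases x t = bases_alt x t := by
  intro x t hPre
  unfold Pre_bases at hPre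
  unfold bases bases_alt
  set s := PySem.Int.toChars x with hs
  have hr : -(s.length : Int) ≤ t ∧ t < s.length := by
    simpa [PySem.Raise.InRange] using hPre
  have hne : PySem.List.pyGet? s t ≠ none := by
    intro hnone
    rw [PySem.List.pyGet?_eq_none_iff] at hnone
    exact hnone hPre
  obtain ⟨z, hz⟩ := Option.ne_none_iff_exists'.mp hne
  simp only [hz]
  rw [loopB_eq_recA s (2 * s.length) t z "" hz (by omega)]
  simp

-- ===== VERDICT (by name: the statement is the Claim_ definition above) =====
theorem bases_spec : Claim_equal_bases := by
  intro x t _ hPre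
  exact bases_spec_impl x t hPre
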